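-- pv_equiv track=rewrite | github.com/CasualEd/SteganographieImage | SteganographieImage.py | alleger
-- ===== SOURCE A (Python) =====
-- def alleger(n):
--     n=n//16
--     a=0
--     for i in range(4):
--         if n!=0:
--             a+=(n%2)*2**(4+i)
--         n=n//2
--     return a
-- ===== SOURCE B (Python) =====
-- def alleger(n):
--     return ((n // 16) % 16) * 16
-- ===== Notes on version B (the rewrite author's own statement) =====
-- stated objective: simpler
-- what changed: Replaced the fixed-count bit-by-bit extraction loop (per-bit mod, guard and accumulate) with a single closed-form arithmetic expression masking the low nibble of the quotient and scaling it up.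
import Mathlib
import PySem

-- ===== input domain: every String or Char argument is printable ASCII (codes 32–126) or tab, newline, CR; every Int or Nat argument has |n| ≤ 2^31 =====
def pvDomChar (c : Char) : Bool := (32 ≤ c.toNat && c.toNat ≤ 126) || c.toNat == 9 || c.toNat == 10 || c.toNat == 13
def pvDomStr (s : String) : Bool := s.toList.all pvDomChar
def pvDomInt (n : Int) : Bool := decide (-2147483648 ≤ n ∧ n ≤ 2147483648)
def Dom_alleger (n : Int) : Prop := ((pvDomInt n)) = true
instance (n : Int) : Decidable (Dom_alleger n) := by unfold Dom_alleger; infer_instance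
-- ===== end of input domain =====

-- B replaces A's bit-by-bit extraction loop with the closed form ((n // 16) % 16) * 16 (simpler).
-- ===== PORT A =====
-- A: loop i=0..3 extracting bit i of n//16 into a at weight 2^(4+i)
def allegerStep (st : Int × Int) (i : Nat) : Int × Int :=
  let (n, a) := st
  let a' := if n ≠ 0 then a + PySem.Int.mod n 2 * 2 ^ (4 + i) else a
  (PySem.Int.floordiv n 2, a')

def alleger (n : Int) : Int :=
  let n := PySem.Int.floordiv n 16
  ((List.range 4).foldl allegerStep (n, 0)).2

-- ===== PORT B =====
-- B: closed form, low 4 bits of n//16 shifted up by 4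
def alleger_alt (n : Int) : Int :=
  PySem.Int.mod (PySem.Int.floordiv n 16) 16 * 16

-- ===== PRECONDITION & SPEC =====
def Spec_alleger (n : Int) (out : Int) : Prop := out = alleger_alt n
instance (n : Int) (out : Int) : Decidable (Spec_alleger n out) := by unfold Spec_alleger; infer_instance

-- ===== CLAIM (what is proved, stated in full; the proofs are below) =====
def Claim_equal_alleger : Prop := ∀ (n : Int), Dom_alleger n → Spec_alleger n (alleger n)

-- ===== LEMMAS AND PROOFS =====

-- ===== VERDICT (by name: the statement is the Claim_ definition above) =====
theorem alleger_spec : Claim_equal_alleger := by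
  intro n _
  unfold Spec_alleger alleger alleger_alt
  simp [List.range_succ, allegerStep,
    PySem.Int.floordiv_eq_ediv_of_pos (a := n) (b := 16) (by norm_num),
    PySem.Int.floordiv_eq_ediv_of_pos (b := 2) (by norm_num),
    PySem.Int.mod_eq_emod_of_pos (b := 2) (by norm_num)]
  split_ifs <;> omega
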